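-- pv_equiv track=rewrite | github.com/dMedinaO/MLSTrainingTool | models/build/lib.linux-x86_64-2.7/mls_models/utils/joinModels.py | compareFourList
-- ===== SOURCE A (Python) =====
-- def compareFourList(list1, list2, list3, list4):
--
--     countElement = 0
--
--     for element1 in list1:
--         for element2 in list2:
--             for element3 in list3:
--                 for element4 in list4:
--                     if (element1 == element2) and (element1 == element3) and (element1 == element4) and (element2 == element3) and (element2 == element4) and (element3 == element4):
--                         countElement+=1
--                         break
--
--     return countElement
-- ===== SOURCE B (Python) =====
-- def compareFourList(list1, list2, list3, list4):
--     total = 0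
--     for v in set(list4):
--         total += list1.count(v) * list2.count(v) * list3.count(v)
--     return total
-- ===== Notes on version B (the rewrite author's own statement) =====
-- stated objective: faster
-- what changed: Replaces A's four nested scans (the break makes list4 a pure membership test) with a single loop over set(list4) summing list1.count(v)*list2.count(v)*list3.count(v).
import Mathlib
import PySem

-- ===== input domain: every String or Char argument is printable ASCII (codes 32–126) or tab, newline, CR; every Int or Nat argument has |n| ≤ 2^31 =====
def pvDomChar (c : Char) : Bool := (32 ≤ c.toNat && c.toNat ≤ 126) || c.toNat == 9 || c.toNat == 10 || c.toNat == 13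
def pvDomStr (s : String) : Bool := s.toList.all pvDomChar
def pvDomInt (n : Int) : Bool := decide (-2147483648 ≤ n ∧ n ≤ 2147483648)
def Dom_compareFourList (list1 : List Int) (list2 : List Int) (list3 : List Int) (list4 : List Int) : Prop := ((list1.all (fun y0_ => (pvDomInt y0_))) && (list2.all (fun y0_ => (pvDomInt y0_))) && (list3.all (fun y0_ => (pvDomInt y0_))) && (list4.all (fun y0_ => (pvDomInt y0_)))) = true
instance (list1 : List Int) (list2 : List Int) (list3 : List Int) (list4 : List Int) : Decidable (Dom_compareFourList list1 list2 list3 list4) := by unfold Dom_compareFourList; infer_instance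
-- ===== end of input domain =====

-- B replaces A's four nested scans by one pass over set(list4) summing products of per-list counts (objective: faster).

-- ===== PORT A =====
-- the innermost 'for element4 in list4: if …: count += 1; break' loop
def pvInner4 (e1 e2 e3 : Int) (l4 : List Int) (c : Int) : Int :=
  match l4 with
  | [] => c
  | e4 :: rest =>
      if e1 = e2 ∧ e1 = e3 ∧ e1 = e4 ∧ e2 = e3 ∧ e2 = e4 ∧ e3 = e4 then c + 1
      else pvInner4 e1 e2 e3 rest c

def compareFourList (list1 : List Int) (list2 : List Int) (list3 : List Int) (list4 : List Int) : Int :=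
  list1.foldl (fun c e1 =>
    list2.foldl (fun c e2 =>
      list3.foldl (fun c e3 => pvInner4 e1 e2 e3 list4 c) c) c) 0

-- ===== PORT B =====
def compareFourList_alt (list1 : List Int) (list2 : List Int) (list3 : List Int) (list4 : List Int) : Int :=
  (PySem.Set.ofList list4).foldl
    (fun total v => total + (list1.count v : Int) * (list2.count v : Int) * (list3.count v : Int)) 0

-- ===== PRECONDITION & SPEC =====
def Spec_compareFourList (list1 : List Int) (list2 : List Int) (list3 : List Int) (list4 : List Int) (out : Int) : Prop := out = compareFourList_alt list1 list2 list3 list4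
instance (list1 : List Int) (list2 : List Int) (list3 : List Int) (list4 : List Int) (out : Int) : Decidable (Spec_compareFourList list1 list2 list3 list4 out) := by unfold Spec_compareFourList; infer_instance

-- ===== CLAIM (what is proved, stated in full; the proofs are below) =====
def Claim_equal_compareFourList : Prop := ∀ (list1 : List Int) (list2 : List Int) (list3 : List Int) (list4 : List Int), Dom_compareFourList list1 list2 list3 list4 → Spec_compareFourList list1 list2 list3 list4 (compareFourList list1 list2 list3 list4)

-- ===== LEMMAS AND PROOFS =====

-- A's inner break-loop contributes 1 exactly when e1 = e2 = e3 and the value occurs in list4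
lemma pvInner4_eq (e1 e2 e3 : Int) (l4 : List Int) (c : Int) :
    pvInner4 e1 e2 e3 l4 c = c + (if e1 = e2 ∧ e1 = e3 ∧ e1 ∈ l4 then 1 else 0) := by
  induction l4 with
  | nil => simp [pvInner4]
  | cons a l ih =>
      rw [pvInner4, ih]
      by_cases h12 : e1 = e2 <;> by_cases h13 : e1 = e3 <;> by_cases h1a : e1 = a <;>
        subst_vars <;> simp_all

-- the level-3 loop: sums the inner indicator over list3
lemma pvLoop3_eq (e1 e2 : Int) (l3 l4 : List Int) (c : Int) :
    l3.foldl (fun c e3 => pvInner4 e1 e2 e3 l4 c) c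
      = c + (if e1 = e2 ∧ e1 ∈ l4 then (l3.count e1 : Int) else 0) := by
  induction l3 generalizing c with
  | nil => simp
  | cons a l ih =>
      rw [List.foldl_cons, ih, pvInner4_eq, List.count_cons]
      by_cases h12 : e1 = e2 <;> by_cases h1a : e1 = a <;> by_cases h4 : e1 ∈ l4 <;>
        subst_vars <;> simp_all <;> push_cast <;> first | ring | omega

-- the level-2 loop
lemma pvLoop2_eq (e1 : Int) (l2 l3 l4 : List Int) (c : Int) :
    l2.foldl (fun c e2 => l3.foldl (fun c e3 => pvInner4 e1 e2 e3 l4 c) c) c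
      = c + (if e1 ∈ l4 then (l2.count e1 : Int) * (l3.count e1 : Int) else 0) := by
  induction l2 generalizing c with
  | nil => simp
  | cons a l ih =>
      rw [List.foldl_cons, ih, pvLoop3_eq, List.count_cons]
      by_cases h1a : e1 = a
      · subst h1a
        by_cases h4 : e1 ∈ l4 <;> simp_all <;> push_cast <;> ring
      · have hae : ¬ a = e1 := fun h' => h1a h'.symm
        by_cases h4 : e1 ∈ l4 <;> simp_all [hae]

-- the outer loop, with accumulator
lemma pvLoop1_eq (l1 l2 l3 l4 : List Int) (c : Int) :
    l1.foldl (fun c e1 =>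
      l2.foldl (fun c e2 => l3.foldl (fun c e3 => pvInner4 e1 e2 e3 l4 c) c) c) c
      = c + (l1.map (fun e1 => if e1 ∈ l4 then (l2.count e1 : Int) * (l3.count e1 : Int) else 0)).sum := by
  induction l1 generalizing c with
  | nil => simp
  | cons a l ih =>
      rw [List.foldl_cons, ih, pvLoop2_eq, List.map_cons, List.sum_cons]
      ring

-- over a duplicate-free list, the sum of a single-point indicator is that point's value
lemma pvSum_single (s : List Int) (hs : s.Nodup) (e : Int) (h : Int → Int) :
    (s.map (fun v => if v = e then h v else 0)).sum = if e ∈ s then h e else 0 := by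
  induction s with
  | nil => simp
  | cons a l ih =>
      rcases List.nodup_cons.mp hs with ⟨ha, hl⟩
      rw [List.map_cons, List.sum_cons, ih hl]
      by_cases hae : a = e
      · subst hae; simp [ha]
      · have hea : ¬ e = a := fun h' => hae h'.symm
        simp [hae, hea]

-- exchange the sum over l1 with the sum over the duplicate-free list s
lemma pvExchange (l1 s : List Int) (hs : s.Nodup) (h : Int → Int) :
    (l1.map (fun e => if e ∈ s then h e else 0)).sum
      = (s.map (fun v => (l1.count v : Int) * h v)).sum := by
  induction l1 with
  | nil => simp
  | cons a l ih =>
      simp only [List.map_cons, List.sum_cons, ih, List.count_cons]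
      have : (s.map (fun v => ((l.count v + if (a == v) = true then 1 else 0 : Nat) : Int) * h v)).sum
           = (s.map (fun v => (l.count v : Int) * h v)).sum
             + (s.map (fun v => if v = a then h v else 0)).sum := by
        rw [← PySem.List.sum_map_add_int]
        refine congrArg List.sum (List.map_congr_left fun v _ => ?_)
        by_cases hva : v = a
        · subst hva; simp; push_cast; ring
        · have hav : ¬ a = v := fun h' => hva h'.symm
          simp [hva, hav]
      rw [this, pvSum_single s hs a h]
      ring

-- ===== VERDICT (by name: the statement is the Claim_ definition above) =====
theorem compareFourList_spec : Claim_equal_compareFourList := by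
  intro l1 l2 l3 l4 _
  unfold Spec_compareFourList compareFourList_alt compareFourList
  rw [PySem.List.foldl_add, pvLoop1_eq, zero_add, zero_add]
  have := pvExchange l1 (PySem.Set.ofList l4) (PySem.Set.nodup_ofList l4)
    (fun v => (l2.count v : Int) * (l3.count v : Int))
  simp only [PySem.Set.mem_ofList] at this
  rw [this]
  exact congrArg List.sum (List.map_congr_left fun v _ => by ring)
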